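-- pv_equiv track=rewrite | github.com/FraPet/SMOOTH-asr_nlp_pipeline | src/formatter.py | format_sentences
-- ===== SOURCE A (Python) =====
-- def format_sentences(tokens):
--     """
--     Format tokens into CHAT-like lines with *PAR:
--     Each sentence starts with '*PAR:\t' followed by word/LABEL pairs.
--     Sentence boundaries are determined by the 'SENT_END' marker.
--     """
--     output_lines = []
--     sentence = "*PAR:\t"
--
--     for word, label in tokens:
--         if label == "SENT_END":
--             if sentence.strip() != "*PAR:":
--                 output_lines.append(sentence.strip())
--             sentence = "*PAR:\t"
--         else:
--             sentence += f"{word}/{label} "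
--
--     # Handle last sentence (if not empty)
--     if sentence.strip() != "*PAR:":
--         output_lines.append(sentence.strip())
--
--     return "\n".join(output_lines)
-- ===== SOURCE B (Python) =====
-- def format_sentences(tokens):
--     """
--     Format tokens into CHAT-like lines with *PAR:
--     Group-then-join reformulation: one pass splits the tokens into sentence
--     groups at 'SENT_END' markers, then each non-empty group is rendered as a
--     single joined line.
--     """
--     done, current = [], []
--     for word, label in tokens:
--         if label == "SENT_END":
--             done.append(current)
--             current = []
--         else:
--             current.append((word, label))
--     done.append(current)
--     lines = [("*PAR:\t" + " ".join(f"{w}/{l}" for w, l in group)).rstrip()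
--              for group in done if group]
--     return "\n".join(lines)
-- ===== Notes on version B (the rewrite author's own statement) =====
-- stated objective: simpler
-- what changed: Replaces the incremental string building with strip()-guard appends by a group-then-join decomposition: one pass splits tokens into sentence groups at SENT_END, then each non-empty group is rendered with ' '.join of word/label pairs.
import Mathlib
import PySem

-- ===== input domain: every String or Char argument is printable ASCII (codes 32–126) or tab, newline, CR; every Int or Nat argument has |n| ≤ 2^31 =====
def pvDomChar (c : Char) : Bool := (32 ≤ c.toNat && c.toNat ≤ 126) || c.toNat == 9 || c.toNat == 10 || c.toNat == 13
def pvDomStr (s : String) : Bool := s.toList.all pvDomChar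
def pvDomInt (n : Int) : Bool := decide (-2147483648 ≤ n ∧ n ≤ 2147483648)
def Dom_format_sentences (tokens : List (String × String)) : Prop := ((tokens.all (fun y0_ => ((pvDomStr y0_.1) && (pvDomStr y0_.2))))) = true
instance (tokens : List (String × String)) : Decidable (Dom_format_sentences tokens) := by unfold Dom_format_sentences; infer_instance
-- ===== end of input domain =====

-- B replaces A's incremental string building (with strip()-guard appends) by a
-- group-then-join decomposition: split tokens into sentence groups, join each
-- non-empty group into one line.  Objective: simpler.

-- ===== PORT A =====
def format_sentences (tokens : List (String × String)) : String :=
  let step := fun (st : List String × String) (t : String × String) =>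
    if t.2 == "SENT_END" then
      ((if PySem.Str.strip st.2 ≠ "*PAR:" then st.1 ++ [PySem.Str.strip st.2] else st.1),
       "*PAR:\t")
    else
      (st.1, st.2 ++ (t.1 ++ "/" ++ t.2 ++ " "))
  let fin := tokens.foldl step ([], "*PAR:\t")
  let output_lines :=
    if PySem.Str.strip fin.2 ≠ "*PAR:" then fin.1 ++ [PySem.Str.strip fin.2] else fin.1
  PySem.Str.join "\n" output_lines

-- ===== PORT B =====
def format_sentences_alt (tokens : List (String × String)) : String :=
  let st := tokens.foldl
    (fun (st : List (List (String × String)) × List (String × String)) (t : String × String) =>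
      if t.2 == "SENT_END" then (st.1 ++ [st.2], []) else (st.1, st.2 ++ [t]))
    ([], [])
  let done := st.1 ++ [st.2]
  let lines := (done.filter (fun g => !g.isEmpty)).map
    (fun g => PySem.Str.rstrip ("*PAR:\t" ++ PySem.Str.join " " (g.map (fun p => p.1 ++ "/" ++ p.2))))
  PySem.Str.join "\n" lines

-- ===== PRECONDITION & SPEC =====
def Spec_format_sentences (tokens : List (String × String)) (out : String) : Prop := out = format_sentences_alt tokens
instance (tokens : List (String × String)) (out : String) : Decidable (Spec_format_sentences tokens out) := by unfold Spec_format_sentences; infer_instance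

-- ===== CLAIM (what is proved, stated in full; the proofs are below) =====
def Claim_equal_format_sentences : Prop := ∀ (tokens : List (String × String)), Dom_format_sentences tokens → Spec_format_sentences tokens (format_sentences tokens)

-- ===== LEMMAS AND PROOFS =====

-- proof-side copies of the two fold steps and the line renderer
def pvStepA (st : List String × String) (t : String × String) : List String × String :=
  if t.2 == "SENT_END" then
    ((if PySem.Str.strip st.2 ≠ "*PAR:" then st.1 ++ [PySem.Str.strip st.2] else st.1), "*PAR:\t")
  else
    (st.1, st.2 ++ (t.1 ++ "/" ++ t.2 ++ " "))

def pvStepB (st : List (List (String × String)) × List (String × String)) (t : String × String) :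
    List (List (String × String)) × List (String × String) :=
  if t.2 == "SENT_END" then (st.1 ++ [st.2], []) else (st.1, st.2 ++ [t])

def pvLine (g : List (String × String)) : String :=
  PySem.Str.rstrip ("*PAR:\t" ++ PySem.Str.join " " (g.map (fun p => p.1 ++ "/" ++ p.2)))

-- A's running sentence string after consuming group g
def pvSent (g : List (String × String)) : String :=
  g.foldl (fun acc p => acc ++ (p.1 ++ "/" ++ p.2 ++ " ")) "*PAR:\t"

def pvFinalize (st : List String × String) : List String :=
  if PySem.Str.strip st.2 ≠ "*PAR:" then st.1 ++ [PySem.Str.strip st.2] else st.1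

-- common reference: the list of output lines for remaining tokens, current group g
def pvRef : List (String × String) → List (String × String) → List String
  | g, [] => if g.isEmpty then [] else [pvLine g]
  | g, (w, l) :: rest =>
    if l == "SENT_END" then (if g.isEmpty then pvRef [] rest else pvLine g :: pvRef [] rest)
    else pvRef (g ++ [(w, l)]) rest

-- B's grouping of remaining tokens, current group cur
def pvGrps : List (String × String) → List (String × String) → List (List (String × String))
  | cur, [] => [cur]
  | cur, (w, l) :: rest =>
    if l == "SENT_END" then cur :: pvGrps [] rest else pvGrps (cur ++ [(w, l)]) rest

-- char-level picture of pvSent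
def pvPartC (p : String × String) : List Char := p.1.toList ++ '/' :: p.2.toList

lemma foldl_toList (g : List (String × String)) : ∀ acc : String,
    (g.foldl (fun acc p => acc ++ (p.1 ++ "/" ++ p.2 ++ " ")) acc).toList
      = acc.toList ++ (g.map (fun p => pvPartC p ++ [' '])).flatten := by
  induction g with
  | nil => simp
  | cons p gs ih => intro acc; simp [List.foldl_cons, ih, pvPartC, String.toList_append]

lemma toList_pvSent (g : List (String × String)) :
    (pvSent g).toList = "*PAR:\t".toList ++ (g.map (fun p => pvPartC p ++ [' '])).flatten :=
  foldl_toList g _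

lemma pvSent_concat (g : List (String × String)) (w l : String) :
    pvSent g ++ (w ++ "/" ++ l ++ " ") = pvSent (g ++ [(w, l)]) := by
  apply String.toList_inj.mp
  simp [toList_pvSent, String.toList_append, pvPartC]

lemma lstrip_star (x : List Char) :
    PySem.Chars.lstrip ("*PAR:\t".toList ++ x) = "*PAR:\t".toList ++ x := by
  have h : "*PAR:\t".toList = '*' :: "PAR:\t".toList := by decide
  simp [PySem.Chars.lstrip, h, PySem.Chars.isspace]

lemma rstrip_space (x : List Char) :
    PySem.Chars.rstrip (x ++ [' ']) = PySem.Chars.rstrip x := by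
  simp [PySem.Chars.rstrip, PySem.Chars.isspace]

lemma interc_cons_cons (sep x y : List Char) (zs : List (List Char)) :
    sep.intercalate (x :: y :: zs) = x ++ sep ++ sep.intercalate (y :: zs) := by
  simp [List.intercalate, List.intersperse]

lemma flat_eq_intercalate (p : String × String) (gs : List (String × String)) :
    ((p :: gs).map (fun q => pvPartC q ++ [' '])).flatten
      = [' '].intercalate ((p :: gs).map pvPartC) ++ [' '] := by
  induction gs generalizing p with
  | nil => simp [List.intercalate]
  | cons q qs ih => rw [List.map_cons, List.flatten_cons, ih q]; simp [interc_cons_cons]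

lemma strip_sent_nil : PySem.Str.strip "*PAR:\t" = "*PAR:" := by decide

lemma strip_sent_cons (p : String × String) (gs : List (String × String)) :
    PySem.Str.strip (pvSent (p :: gs)) = pvLine (p :: gs) := by
  show String.ofList _ = String.ofList _
  congr 1
  rw [PySem.Chars.strip, toList_pvSent, flat_eq_intercalate, lstrip_star,
    ← List.append_assoc, rstrip_space]
  have h1 : "/".toList = ['/'] := by decide
  have h2 : " ".toList = [' '] := by decide
  have hf : (String.toList ∘ fun p : String × String => p.1 ++ "/" ++ p.2) = pvPartC :=
    funext (fun q => by simp [pvPartC, Function.comp, String.toList_append, h1])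
  simp [String.toList_append, PySem.Str.toList_join, PySem.Chars.join, List.map_map, hf, h2,
    pvPartC]

lemma count_dropWhile_slash (l : List Char) :
    (l.dropWhile PySem.Chars.isspace).count '/' = l.count '/' := by
  conv_rhs => rw [← List.takeWhile_append_dropWhile (p := PySem.Chars.isspace) (l := l)]
  rw [List.count_append]
  have h0 : (l.takeWhile PySem.Chars.isspace).count '/' = 0 := by
    rw [List.count_eq_zero]
    intro hmem
    have := List.mem_takeWhile_imp hmem
    simp [PySem.Chars.isspace] at this
  omega

lemma count_strip_slash (l : List Char) :
    (PySem.Chars.strip l).count '/' = l.count '/' := by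
  rw [PySem.Chars.strip, PySem.Chars.rstrip, PySem.Chars.lstrip, List.count_reverse,
    count_dropWhile_slash, List.count_reverse, count_dropWhile_slash]

lemma strip_sent_ne (p : String × String) (gs : List (String × String)) :
    PySem.Str.strip (pvSent (p :: gs)) ≠ "*PAR:" := by
  intro h
  have ht : (PySem.Str.strip (pvSent (p :: gs))).toList = "*PAR:".toList := by rw [h]
  rw [PySem.Str.toList_strip] at ht
  have hc := count_strip_slash (pvSent (p :: gs)).toList
  rw [ht, toList_pvSent] at hc
  simp [List.count_append, pvPartC] at hc

lemma finalize_sent (lines : List String) (g : List (String × String)) :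
    pvFinalize (lines, pvSent g) = lines ++ pvRef g [] := by
  cases g with
  | nil => simp [pvFinalize, pvRef, pvSent, strip_sent_nil]
  | cons p gs =>
    have hne : pvLine (p :: gs) ≠ "*PAR:" := strip_sent_cons p gs ▸ strip_sent_ne p gs
    simp [pvFinalize, pvRef, strip_sent_cons, hne]

lemma lemA (toks : List (String × String)) :
    ∀ (lines : List String) (g : List (String × String)),
      pvFinalize (toks.foldl pvStepA (lines, pvSent g)) = lines ++ pvRef g toks := by
  induction toks with
  | nil => intro lines g; simpa using finalize_sent lines g
  | cons t rest ih =>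
    intro lines g
    obtain ⟨w, l⟩ := t
    by_cases h : l = "SENT_END"
    · subst h
      rw [List.foldl_cons]
      have hstep : pvStepA (lines, pvSent g) (w, "SENT_END")
          = (pvFinalize (lines, pvSent g), pvSent []) := by
        simp [pvStepA, pvFinalize, pvSent]
      rw [hstep, finalize_sent, ih]
      cases g <;> simp [pvRef]
    · rw [List.foldl_cons]
      have hstep : pvStepA (lines, pvSent g) (w, l) = (lines, pvSent (g ++ [(w, l)])) := by
        simp [pvStepA, h, ← pvSent_concat]
      rw [hstep, ih]
      simp [pvRef, h]

lemma lemB1 (toks : List (String × String)) :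
    ∀ (done : List (List (String × String))) (cur : List (String × String)),
      (toks.foldl pvStepB (done, cur)).1 ++ [(toks.foldl pvStepB (done, cur)).2]
        = done ++ pvGrps cur toks := by
  induction toks with
  | nil => intro done cur; simp [pvGrps]
  | cons t rest ih =>
    intro done cur
    obtain ⟨w, l⟩ := t
    by_cases h : l = "SENT_END"
    · subst h
      rw [List.foldl_cons]
      have hstep : pvStepB (done, cur) (w, "SENT_END") = (done ++ [cur], []) := by
        simp [pvStepB]
      rw [hstep, ih]
      simp [pvGrps]
    · rw [List.foldl_cons]
      have hstep : pvStepB (done, cur) (w, l) = (done, cur ++ [(w, l)]) := by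
        simp [pvStepB, h]
      rw [hstep, ih]
      simp [pvGrps, h]

lemma lemB2 (toks : List (String × String)) :
    ∀ (cur : List (String × String)),
      ((pvGrps cur toks).filter (fun g => !g.isEmpty)).map pvLine = pvRef cur toks := by
  induction toks with
  | nil => intro cur; cases cur <;> simp [pvGrps, pvRef]
  | cons t rest ih =>
    intro cur
    obtain ⟨w, l⟩ := t
    by_cases h : l = "SENT_END"
    · subst h
      cases cur <;> simp [pvGrps, pvRef, ih]
    · simp [pvGrps, pvRef, h, ih]

-- ===== VERDICT (by name: the statement is the Claim_ definition above) =====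
theorem format_sentences_spec : Claim_equal_format_sentences := by
  intro tokens _
  show format_sentences tokens = format_sentences_alt tokens
  have hA : format_sentences tokens
      = PySem.Str.join "\n" (pvFinalize (tokens.foldl pvStepA ([], "*PAR:\t"))) := rfl
  have hB : format_sentences_alt tokens
      = PySem.Str.join "\n"
          ((((tokens.foldl pvStepB ([], [])).1 ++ [(tokens.foldl pvStepB ([], [])).2]).filter
            (fun g => !g.isEmpty)).map pvLine) := rfl
  rw [hA, hB, lemB1, List.nil_append]
  have : ("*PAR:\t" : String) = pvSent [] := rfl
  rw [this, lemA, lemB2, List.nil_append]
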